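-- pv_equiv track=rewrite | github.com/ntcqwq/kitchen | cp/DMOJ/DMOPC/2023/April/p4.py | find_ls
-- ===== SOURCE A (Python) =====
-- def find_ls(N, reviews):
--     ls = 0
--     for a in range(1440):
--         s = 0
--         lda = False
--         for t in reviews:
--             if (t - a) % 1440 < 2:
--                 if lda:
--                     s += 1
--                 else:
--                     s = 1
--                     lda = True
--             elif (t - a) % 1440 >= (1440 - 2):
--                 if lda:
--                     s += 1
--                     lda = False
--             else:
--                 if not lda:
--                     s = 1
--                     lda = True
--                 else:
--                     s += 1
--         if s > ls:
--             ls = s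
--     return ls
-- ===== SOURCE B (Python) =====
-- def _tail_len(a, rev):
--     # rev = reviews reversed; a token t is "late" iff (t - a) % 1440 >= 1438.
--     # The final run length of A's state machine depends only on the tail of the
--     # sequence: it is the trailing non-late count if positive; otherwise skip the
--     # trailing late run and return the next non-late run length plus one.
--     n = len(rev)
--     i = 0
--     while i < n and (rev[i] - a) % 1440 < 1438:
--         i += 1
--     if i > 0:
--         return i
--     while i < n and (rev[i] - a) % 1440 >= 1438:
--         i += 1
--     if i == n:
--         return 0
--     j = i
--     while j < n and (rev[j] - a) % 1440 < 1438:
--         j += 1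
--     return j - i + 1
--
--
-- def find_ls(N, reviews):
--     rev = reviews[::-1]
--     best = 0
--     for a in range(1440):
--         best = max(best, _tail_len(a, rev))
--     return best
-- ===== Notes on version B (the rewrite author's own statement) =====
-- stated objective: faster
-- what changed: A forward-simulates a 3-branch state machine over the whole review list for each of the 1440 offsets; B observes that the final count depends only on the tail runs of the sequence, so for each offset it scans the reversed list with early exit, returning the trailing non-late run length (or, after a trailing late run, the next run length plus one).
import Mathlib
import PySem

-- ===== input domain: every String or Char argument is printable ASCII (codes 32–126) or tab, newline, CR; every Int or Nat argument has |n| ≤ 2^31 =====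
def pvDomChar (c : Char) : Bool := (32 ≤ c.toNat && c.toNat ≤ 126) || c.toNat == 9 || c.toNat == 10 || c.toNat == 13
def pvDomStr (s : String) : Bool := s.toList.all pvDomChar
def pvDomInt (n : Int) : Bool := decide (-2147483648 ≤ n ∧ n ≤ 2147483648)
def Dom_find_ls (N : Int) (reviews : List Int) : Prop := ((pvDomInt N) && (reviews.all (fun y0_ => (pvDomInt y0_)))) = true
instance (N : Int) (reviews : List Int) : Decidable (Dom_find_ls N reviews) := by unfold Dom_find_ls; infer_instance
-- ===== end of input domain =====

-- B replaces A's per-offset forward state-machine simulation by a reverse scan with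
-- early exit that reads the answer off the tail runs (objective: faster, constant-factor).

-- ===== PORT A =====
-- inner loop body of A for offset a, state (s, lda), literal branch order
def pvStepA (a : Int) (st : Int × Bool) (t : Int) : Int × Bool :=
  if PySem.Int.mod (t - a) 1440 < 2 then
    if st.2 then (st.1 + 1, st.2) else (1, true)
  else if PySem.Int.mod (t - a) 1440 ≥ 1440 - 2 then
    if st.2 then (st.1 + 1, false) else st
  else
    if !st.2 then (1, true) else (st.1 + 1, st.2)

def find_ls (N : Int) (reviews : List Int) : Int :=
  (PySem.List.pyRange 0 1440 1).foldl
    (fun ls a =>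
      let r := reviews.foldl (pvStepA a) (0, false)
      if r.1 > ls then r.1 else ls)
    0

-- ===== PORT B =====
-- B's first while loop: count of leading elements of rev that are not "late" for offset a
def pvLeadN (a : Int) : List Int → Int
  | [] => 0
  | t :: r => if PySem.Int.mod (t - a) 1440 < 1438 then pvLeadN a r + 1 else 0

-- B's second while loop: drop the leading "late" run of rev
def pvDropB (a : Int) : List Int → List Int
  | [] => []
  | t :: r => if PySem.Int.mod (t - a) 1440 ≥ 1438 then pvDropB a r else t :: r

-- B's _tail_len
def pvTailLen (a : Int) (rev : List Int) : Int :=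
  let i := pvLeadN a rev
  if i > 0 then i
  else
    match pvDropB a rev with
    | [] => 0
    | r => pvLeadN a r + 1

def find_ls_alt (N : Int) (reviews : List Int) : Int :=
  let rev := (PySem.List.slice? reviews none none (-1)).getD []
  (PySem.List.pyRange 0 1440 1).foldl (fun best a => max best (pvTailLen a rev)) 0

-- ===== PRECONDITION & SPEC =====
def Spec_find_ls (N : Int) (reviews : List Int) (out : Int) : Prop := out = find_ls_alt N reviews
instance (N : Int) (reviews : List Int) (out : Int) : Decidable (Spec_find_ls N reviews out) := by unfold Spec_find_ls; infer_instance

-- ===== CLAIM (what is proved, stated in full; the proofs are below) =====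
def Claim_equal_find_ls : Prop := ∀ (N : Int) (reviews : List Int), Dom_find_ls N reviews → Spec_find_ls N reviews (find_ls N reviews)

-- ===== LEMMAS AND PROOFS =====

-- the lda flag after processing xs is "xs ends with an element that is not late"
def pvLda (a : Int) : List Int → Bool
  | [] => false
  | t :: _ => !decide (1438 ≤ PySem.Int.mod (t - a) 1440)

-- A's step in merged form: the first and third branches act identically
lemma pvStepA_eq (a : Int) (st : Int × Bool) (t : Int) :
    pvStepA a st t =
      if 1438 ≤ PySem.Int.mod (t - a) 1440 then
        (if st.2 then (st.1 + 1, false) else st)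
      else
        (if st.2 then (st.1 + 1, true) else (1, true)) := by
  unfold pvStepA
  split_ifs with h1 h2 h3 h4 h5 h6 h7 <;> simp_all <;> omega

lemma pvLeadN_nonneg (a : Int) : ∀ r : List Int, 0 ≤ pvLeadN a r
  | [] => le_refl 0
  | t :: r => by
      simp only [pvLeadN]
      split
      · have := pvLeadN_nonneg a r; omega
      · exact le_refl 0

lemma pvLeadN_cons_N (a t : Int) (r : List Int)
    (h : PySem.Int.mod (t - a) 1440 < 1438) :
    pvLeadN a (t :: r) = pvLeadN a r + 1 := by
  simp only [pvLeadN, if_pos h]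

lemma pvLeadN_cons_B (a t : Int) (r : List Int)
    (h : 1438 ≤ PySem.Int.mod (t - a) 1440) :
    pvLeadN a (t :: r) = 0 := by
  simp only [pvLeadN, if_neg (by omega : ¬ PySem.Int.mod (t - a) 1440 < 1438)]

lemma pvDropB_cons_B (a t : Int) (r : List Int)
    (h : 1438 ≤ PySem.Int.mod (t - a) 1440) :
    pvDropB a (t :: r) = pvDropB a r := by
  simp only [pvDropB, if_pos h]

lemma pvDropB_cons_N (a t : Int) (r : List Int)
    (h : PySem.Int.mod (t - a) 1440 < 1438) :
    pvDropB a (t :: r) = t :: r := by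
  simp only [pvDropB, if_neg (by omega : ¬ 1438 ≤ PySem.Int.mod (t - a) 1440)]

lemma pvTailLen_cons_N (a t : Int) (r : List Int)
    (h : PySem.Int.mod (t - a) 1440 < 1438) :
    pvTailLen a (t :: r) = pvLeadN a r + 1 := by
  have hn := pvLeadN_nonneg a r
  simp only [pvTailLen, pvLeadN_cons_N a t r h, if_pos (by omega : pvLeadN a r + 1 > 0)]

-- a late element on top of a list that starts late (or is empty) changes nothing
lemma pvTailLen_cons_B_eq (a t : Int) (r : List Int)
    (hB : 1438 ≤ PySem.Int.mod (t - a) 1440) (hr : pvLeadN a r = 0) :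
    pvTailLen a (t :: r) = pvTailLen a r := by
  simp only [pvTailLen, pvLeadN_cons_B a t r hB, pvDropB_cons_B a t r hB, hr]

-- a late element closing a run: one more than the run it closes
lemma pvTailLen_cons_B_N (a t u : Int) (r : List Int)
    (hB : 1438 ≤ PySem.Int.mod (t - a) 1440)
    (hu : PySem.Int.mod (u - a) 1440 < 1438) :
    pvTailLen a (t :: u :: r) = pvLeadN a (u :: r) + 1 := by
  simp only [pvTailLen, pvLeadN_cons_B a t (u :: r) hB,
    pvDropB_cons_B a t (u :: r) hB, pvDropB_cons_N a u r hu]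
  exact if_neg (lt_irrefl 0)

-- the key invariant: A's inner fold computes B's tail scan and the lda flag
lemma fold_eq_tail (a : Int) : ∀ (L : List Int),
    L.reverse.foldl (pvStepA a) (0, false) = (pvTailLen a L, pvLda a L) := by
  intro L
  induction L with
  | nil => rfl
  | cons t L' ih =>
    have hfold : (t :: L').reverse.foldl (pvStepA a) (0, false)
        = pvStepA a (L'.reverse.foldl (pvStepA a) (0, false)) t := by
      simp only [List.reverse_cons, List.foldl_append, List.foldl_cons, List.foldl_nil]
    rw [hfold, ih, pvStepA_eq]
    by_cases hB : 1438 ≤ PySem.Int.mod (t - a) 1440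
    · -- t is late
      have hlda2 : pvLda a (t :: L') = false := by
        simp only [pvLda, decide_eq_true hB, Bool.not_true]
      rw [if_pos hB, hlda2]
      cases L' with
      | nil =>
        rw [show pvLda a [] = false from rfl, if_neg Bool.false_ne_true,
          pvTailLen_cons_B_eq a t [] hB rfl]
      | cons u L'' =>
        by_cases hu : 1438 ≤ PySem.Int.mod (u - a) 1440
        · -- previous lda = false: this late review is ignored, state unchanged
          have hlda : pvLda a (u :: L'') = false := by
            simp only [pvLda, decide_eq_true hu, Bool.not_true]
          rw [hlda, if_neg Bool.false_ne_true,
            pvTailLen_cons_B_eq a t (u :: L'') hB (pvLeadN_cons_B a u L'' hu)]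
        · -- previous lda = true: close the run, add one
          have hu' : PySem.Int.mod (u - a) 1440 < 1438 := by omega
          have hlda : pvLda a (u :: L'') = true := by
            simp only [pvLda, decide_eq_false hu, Bool.not_false]
          rw [hlda, if_pos rfl, pvTailLen_cons_B_N a t u L'' hB hu',
            pvTailLen_cons_N a u L'' hu', pvLeadN_cons_N a u L'' hu']
    · -- t is normal
      have hB' : PySem.Int.mod (t - a) 1440 < 1438 := by omega
      have hlda2 : pvLda a (t :: L') = true := by
        simp only [pvLda, decide_eq_false hB, Bool.not_false]
      rw [if_neg hB, hlda2, pvTailLen_cons_N a t L' hB']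
      cases L' with
      | nil =>
        rw [show pvLda a [] = false from rfl, if_neg Bool.false_ne_true]
        norm_num [pvLeadN]
      | cons u L'' =>
        by_cases hu : 1438 ≤ PySem.Int.mod (u - a) 1440
        · -- previous lda = false: restart the run at 1
          have hlda : pvLda a (u :: L'') = false := by
            simp only [pvLda, decide_eq_true hu, Bool.not_true]
          rw [hlda, if_neg Bool.false_ne_true, pvLeadN_cons_B a u L'' hu]
          norm_num
        · -- previous lda = true: extend the run
          have hu' : PySem.Int.mod (u - a) 1440 < 1438 := by omega
          have hlda : pvLda a (u :: L'') = true := by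
            simp only [pvLda, decide_eq_false hu, Bool.not_false]
          rw [hlda, if_pos rfl, pvTailLen_cons_N a u L'' hu', pvLeadN_cons_N a u L'' hu']

-- ===== VERDICT (by name: the statement is the Claim_ definition above) =====
theorem find_ls_spec : Claim_equal_find_ls := by
  intro N reviews _
  unfold Spec_find_ls find_ls find_ls_alt
  rw [PySem.List.slice?_none_none_neg_one]
  simp only [Option.getD_some]
  congr 1
  funext ls a
  have h := fold_eq_tail a reviews.reverse
  rw [List.reverse_reverse] at h
  rw [h]
  simp only [max_def]
  split_ifs <;> first | rfl | omega
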